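-- pv_equiv track=rewrite | github.com/mmemomed/trifase | segundoUI.py | encArduino
-- ===== SOURCE A (Python) =====
-- def encArduino(obtpuerto): #Determinara a que puerto esta conectado el arduino
--     commPort = 'Ninguno'
--     conexiones = len(obtpuerto)
--
--     for i in range(0,conexiones):
--         puerto = obtpuerto[i]
--         puertostring = str(puerto)
--
--         if 'Arduino' in puertostring:
--             separaPuerto = puertostring.split(' ')
--             commPort = (separaPuerto[0])
--
--     return commPort
-- ===== SOURCE B (Python) =====
-- def encArduino(obtpuerto):
--     for puerto in reversed(obtpuerto):
--         s = str(puerto)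
--         if 'Arduino' in s:
--             return s.split(' ')[0]
--     return 'Ninguno'
-- ===== Notes on version B (the rewrite author's own statement) =====
-- stated objective: simpler
-- what changed: B drops the accumulator and index loop: it scans the list in reverse and returns the first token of the first (i.e. last overall) entry containing 'Arduino' immediately, 'Ninguno' if none.
import Mathlib
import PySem

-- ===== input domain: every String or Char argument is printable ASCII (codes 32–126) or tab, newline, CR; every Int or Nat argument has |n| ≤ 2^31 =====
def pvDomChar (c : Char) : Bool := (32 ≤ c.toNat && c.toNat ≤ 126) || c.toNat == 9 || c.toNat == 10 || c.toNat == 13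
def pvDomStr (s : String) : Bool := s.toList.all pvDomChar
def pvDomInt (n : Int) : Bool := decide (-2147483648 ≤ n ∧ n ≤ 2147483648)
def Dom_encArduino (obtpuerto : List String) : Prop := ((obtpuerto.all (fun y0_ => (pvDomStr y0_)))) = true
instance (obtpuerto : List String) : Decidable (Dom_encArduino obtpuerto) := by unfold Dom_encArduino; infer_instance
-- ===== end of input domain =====

-- B replaces A's accumulator + forward index loop by a reverse scan with early return (same value; objective: simpler).
-- ===== PORT A =====
def encArduino (obtpuerto : List String) : String :=
  let conexiones : Int := (obtpuerto.length : Int)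
  (PySem.List.pyRange 0 conexiones 1).foldl
    (fun commPort i =>
      let puerto := PySem.List.pyGetD obtpuerto i ""   -- index always in range
      let puertostring := puerto
      if PySem.Str.isIn "Arduino" puertostring then
        let separaPuerto := ((PySem.Str.split? puertostring " ").getD [])
        PySem.List.pyGetD separaPuerto 0 ""            -- split with nonempty sep is never []
      else commPort)
    "Ninguno"

-- ===== PORT B =====
def encArduinoRev : List String → String
  | [] => "Ninguno"
  | s :: rest =>
      if PySem.Str.isIn "Arduino" s then PySem.List.pyGetD (((PySem.Str.split? s " ").getD [])) 0 ""
      else encArduinoRev rest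

def encArduino_alt (obtpuerto : List String) : String :=
  encArduinoRev obtpuerto.reverse

-- ===== PRECONDITION & SPEC =====
def Spec_encArduino (obtpuerto : List String) (out : String) : Prop := out = encArduino_alt obtpuerto
instance (obtpuerto : List String) (out : String) : Decidable (Spec_encArduino obtpuerto out) := by unfold Spec_encArduino; infer_instance

-- ===== CLAIM (what is proved, stated in full; the proofs are below) =====
def Claim_equal_encArduino : Prop := ∀ (obtpuerto : List String), Dom_encArduino obtpuerto → Spec_encArduino obtpuerto (encArduino obtpuerto)

-- ===== LEMMAS AND PROOFS =====

-- step of A's fold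
def pvStep (commPort puertostring : String) : String :=
  if PySem.Str.isIn "Arduino" puertostring then
    PySem.List.pyGetD ((PySem.Str.split? puertostring " ").getD []) 0 ""
  else commPort

theorem pvRev_no_match (xs : List String)
    (h : xs.all (fun s => !PySem.Str.isIn "Arduino" s) = true) :
    encArduinoRev xs = "Ninguno" := by
  induction xs with
  | nil => rfl
  | cons s rest ih =>
      simp only [List.all_cons, Bool.and_eq_true, Bool.not_eq_true'] at h
      have h1 : ¬ PySem.Str.isIn "Arduino" s = true := by
        rw [h.1]; exact Bool.false_ne_true
      rw [encArduinoRev, if_neg h1, ih h.2]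

theorem pvFoldl_eq (xs : List String) (acc : String) :
    xs.foldl pvStep acc =
      if xs.all (fun s => !PySem.Str.isIn "Arduino" s) = true then acc
      else encArduinoRev xs.reverse := by
  induction xs using List.reverseRecOn generalizing acc with
  | nil => simp
  | append_singleton ys y ih =>
      rw [List.foldl_append, List.foldl_cons, List.foldl_nil, ih acc]
      by_cases hy : PySem.Str.isIn "Arduino" y = true
      · have hys : (ys ++ [y]).all (fun s => !PySem.Str.isIn "Arduino" s) = false := by
          have hy2 : PySem.Chars.isIn ['A','r','d','u','i','n','o'] y.toList = true := by
            simpa using hy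
          simp [List.all_append, hy2]
        rw [hys]
        simp only [Bool.false_eq_true, if_false, List.reverse_append,
          List.reverse_singleton, List.singleton_append, encArduinoRev, if_pos hy]
        split
        · rw [pvStep, if_pos hy]
        · rw [pvStep, if_pos hy]
      · have hy' : PySem.Str.isIn "Arduino" y = false := eq_false_of_ne_true hy
        have hstep : ∀ X, pvStep X y = X := fun X => by rw [pvStep, if_neg hy]
        rw [List.all_append, List.all_cons, List.all_nil, hy']
        simp only [Bool.not_false, Bool.and_true]
        by_cases hys : ys.all (fun s => !PySem.Str.isIn "Arduino" s) = true
        · rw [if_pos hys, if_pos hys, hstep]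
        · have hysf := eq_false_of_ne_true hys
          rw [hysf]
          simp only [Bool.false_eq_true, if_false, List.reverse_append,
            List.reverse_singleton, List.singleton_append, encArduinoRev, if_neg hy,
            hstep]

-- ===== VERDICT (by name: the statement is the Claim_ definition above) =====
theorem encArduino_spec : Claim_equal_encArduino := by
  intro xs _
  unfold Spec_encArduino encArduino encArduino_alt
  have h0 : (0 : Int) ≤ 0 := le_refl 0
  have hb := PySem.List.foldl_pyRange_pyGetD (xs := xs) (f := pvStep) (d := "")
    (init := "Ninguno") (a := 0) h0
  simp only [Int.toNat_zero, List.drop_zero, PySem.List.len] at hb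
  show (PySem.List.pyRange 0 (xs.length : Int) 1).foldl
      (fun commPort i => pvStep commPort (PySem.List.pyGetD xs i "")) "Ninguno"
      = encArduinoRev xs.reverse
  rw [hb, pvFoldl_eq]
  by_cases h : xs.all (fun s => !PySem.Str.isIn "Arduino" s) = true
  · rw [if_pos h, pvRev_no_match xs.reverse (by simpa using h)]
  · rw [if_neg h]
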